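-- pv_equiv track=rewrite | github.com/ganluannj/testcode | Q1418.py | displayTable
-- ===== SOURCE A (Python) =====
-- from typing import List
--
-- orders = [["David","3","Ceviche"],["Corina","10","Beef Burrito"],["David","3","Fried Chicken"],["Carla","5","Water"],["Carla","5","Ceviche"],["Rous","3","Ceviche"]]
--
-- def displayTable(orders: List[List[str]]) -> List[List[str]]:
--     food_set = set()
--     table_set = set()
--     display = []
--
--     for table in orders:
--         table_set.add(table[1])
--         food_set.add(table[2])
--
--     table_set = sorted(table_set, key=lambda x: int(x)) # become a list
--     foods = sorted(food_set)
--     my_dict = {table: [0] * len(foods) for table in table_set}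
--     index_table = {x[1]: x[0] for x in enumerate(foods)}
--
--     head = ['Table']
--     head.extend(foods)
--     display.append(head)
--
--     for order in orders:
--         table, food = order[1], order[2]
--         my_dict[table][index_table[food]] += 1
--
--     for k, v in my_dict.items():
--         my_list = [k]
--         my_list.extend(map(str, v))
--         display.append(my_list)
--
--     return display
-- ===== SOURCE B (Python) =====
-- def displayTable(orders):
--     tables = sorted({o[1] for o in orders}, key=int)
--     foods = sorted({o[2] for o in orders})
--     return [['Table'] + foods] + [
--         [t] + [str(sum(1 for o in orders if o[1] == t and o[2] == f)) for f in foods]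
--         for t in tables]
-- ===== Notes on version B (the rewrite author's own statement) =====
-- stated objective: simpler
-- what changed: B drops A's mutable dict of preallocated zero-vectors and the food->index map entirely: it never maintains any count structure, instead recomputing each cell by a direct scan of orders (sum of matches for that table/food pair) inside a nested comprehension.
import Mathlib
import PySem

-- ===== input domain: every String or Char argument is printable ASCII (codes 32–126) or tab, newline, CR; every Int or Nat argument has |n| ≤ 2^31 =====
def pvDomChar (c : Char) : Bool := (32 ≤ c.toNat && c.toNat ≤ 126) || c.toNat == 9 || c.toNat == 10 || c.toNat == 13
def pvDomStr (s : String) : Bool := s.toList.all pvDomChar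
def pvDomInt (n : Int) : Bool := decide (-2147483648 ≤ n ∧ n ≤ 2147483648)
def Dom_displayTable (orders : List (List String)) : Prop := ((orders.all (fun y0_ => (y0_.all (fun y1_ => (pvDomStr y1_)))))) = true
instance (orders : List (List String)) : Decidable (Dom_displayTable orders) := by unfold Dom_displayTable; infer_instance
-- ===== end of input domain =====

-- B keeps no counting structure at all: instead of A's single pass that mutates a dict of
-- preallocated zero-vectors through a food->index map, B recomputes each output cell by a
-- direct scan of orders (simpler; not faster).

-- ===== PORT A =====
-- Literal transliteration of A. Under Pre_ every row has ≥ 3 entries, every table string parses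
-- with int(), and the table key is always present and the food index in range, so the totalized
-- forms pyGetD / (ofStr?).getD 0 / modify-with-default are exact there.
def displayTable (orders : List (List String)) : List (List String) :=
  let sets := orders.foldl
    (fun (p : PySem.Set String × PySem.Set String) table =>
      (PySem.Set.add p.1 (PySem.List.pyGetD table 1 ""),
       PySem.Set.add p.2 (PySem.List.pyGetD table 2 "")))
    (PySem.Set.empty, PySem.Set.empty)
  let tableSet := PySem.List.sorted sets.1 (fun x => (PySem.Int.ofStr? x).getD 0) false
  let foods := PySem.List.sorted sets.2 (fun x => x) false
  let myDict0 : PySem.Dict String (List Int) :=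
    tableSet.foldl (fun d t => d.insert t (List.replicate foods.length 0)) PySem.Dict.empty
  let indexTable : PySem.Dict String Int :=
    (PySem.List.enumerate foods 0).foldl (fun d x => d.insert x.2 x.1) PySem.Dict.empty
  let head := "Table" :: foods
  let myDict := orders.foldl
    (fun (d : PySem.Dict String (List Int)) order =>
      let table := PySem.List.pyGetD order 1 ""
      let food := PySem.List.pyGetD order 2 ""
      d.modify table [] (fun v =>
        PySem.List.pySetD v (indexTable.getD food 0)
          (PySem.List.pyGetD v (indexTable.getD food 0) 0 + 1)))
    myDict0
  head :: myDict.items.map (fun kv => kv.1 :: kv.2.map PySem.Int.toStr)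

-- ===== PORT B =====
def displayTable_alt (orders : List (List String)) : List (List String) :=
  let tables := PySem.List.sorted
    (PySem.Set.ofList (orders.map (fun o => PySem.List.pyGetD o 1 "")))
    (fun x => (PySem.Int.ofStr? x).getD 0) false
  let foods := PySem.List.sorted
    (PySem.Set.ofList (orders.map (fun o => PySem.List.pyGetD o 2 "")))
    (fun x => x) false
  ["Table" :: foods] ++
    tables.map (fun t => t :: foods.map (fun f =>
      PySem.Int.toStr (orders.foldl
        (fun acc o =>
          if PySem.List.pyGetD o 1 "" == t && PySem.List.pyGetD o 2 "" == f
          then acc + 1 else acc) (0 : Int))))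

-- ===== PRECONDITION & SPEC =====
-- Pre_ excludes inputs where Python A raises (a row shorter than 3, or a table string int() rejects)
-- and inputs where two distinct table strings have the same int value: there A's data-row order is
-- Python's hash-dependent set-iteration order (varies with PYTHONHASHSEED), an accident no port can fix.
def Pre_displayTable (orders : List (List String)) : Prop :=
  (∀ r ∈ orders, 3 ≤ r.length) ∧
  (∀ r ∈ orders, (PySem.Int.ofStr? (PySem.List.pyGetD r 1 "")).isSome = true) ∧
  (∀ r ∈ orders, ∀ r' ∈ orders,
    PySem.Int.ofStr? (PySem.List.pyGetD r 1 "") = PySem.Int.ofStr? (PySem.List.pyGetD r' 1 "") →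
    PySem.List.pyGetD r 1 "" = PySem.List.pyGetD r' 1 "")
instance (orders : List (List String)) : Decidable (Pre_displayTable orders) := by
  unfold Pre_displayTable; infer_instance

def pvWitness_displayTable : List (List String) :=
  [["David", "3", "Ceviche"], ["Corina", "10", "Beef Burrito"], ["David", "3", "Fried Chicken"]]

def Spec_displayTable (orders : List (List String)) (out : List (List String)) : Prop := out = displayTable_alt orders
instance (orders : List (List String)) (out : List (List String)) : Decidable (Spec_displayTable orders out) := by unfold Spec_displayTable; infer_instance

-- ===== CLAIM (what is proved, stated in full; the proofs are below) =====
def Claim_equal_displayTable : Prop := ∀ (orders : List (List String)), Dom_displayTable orders → Pre_displayTable orders → Spec_displayTable orders (displayTable orders)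

-- ===== LEMMAS AND PROOFS =====

-- proof-only abbreviations
def pvK1 (r : List String) : String := PySem.List.pyGetD r 1 ""
def pvK2 (r : List String) : String := PySem.List.pyGetD r 2 ""
def pvFoods (orders : List (List String)) : List String :=
  PySem.List.sorted (PySem.Set.ofList (orders.map pvK2)) (fun x => x) false
def pvTables (orders : List (List String)) : List String :=
  PySem.List.sorted (PySem.Set.ofList (orders.map pvK1)) (fun x => (PySem.Int.ofStr? x).getD 0) false
def pvIdxTbl (orders : List (List String)) : PySem.Dict String Int :=
  (PySem.List.enumerate (pvFoods orders) 0).foldl (fun d x => d.insert x.2 x.1) PySem.Dict.empty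
def pvIx (orders : List (List String)) (r : List String) : Int := (pvIdxTbl orders).getD (pvK2 r) 0

-- A's first loop: the two sets it builds
lemma pv_setsFold (orders : List (List String)) (s1 s2 : PySem.Set String) :
    orders.foldl
      (fun (p : PySem.Set String × PySem.Set String) table =>
        (PySem.Set.add p.1 (pvK1 table),
         PySem.Set.add p.2 (pvK2 table)))
      (s1, s2)
    = (PySem.Set.update s1 (orders.map pvK1), PySem.Set.update s2 (orders.map pvK2)) := by
  induction orders generalizing s1 s2 with
  | nil => rfl
  | cons r rest ih => rw [List.foldl_cons, ih]; rfl

-- B's per-cell counting loop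
lemma pv_cellFold (t f : String) (l : List (List String)) (acc : Int) :
    l.foldl (fun a o => if pvK1 o == t && pvK2 o == f then a + 1 else a) acc
      = acc + (l.countP (fun o => pvK1 o == t && pvK2 o == f) : Int) := by
  induction l generalizing acc with
  | nil => simp
  | cons r rest ih =>
    rw [List.foldl_cons, ih, List.countP_cons]
    by_cases h : (pvK1 r == t && pvK2 r == f) = true
    · simp [h]; ring
    · simp [h]

-- dict comprehension with a constant value
lemma pv_constFold_getD (l : List String) (c : List Int) (d : PySem.Dict String (List Int)) (x : String) :
    ((l.foldl (fun d t => d.insert t c) d).getD x []) = if x ∈ l then c else d.getD x [] := by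
  induction l generalizing d with
  | nil => simp
  | cons h t ih =>
    rw [List.foldl_cons, ih]
    by_cases hx : x ∈ t
    · simp [hx]
    · by_cases hxh : x = h
      · subst hxh; simp [hx, PySem.Dict.getD_insert_self]
      · simp [hx, hxh, PySem.Dict.getD_insert_of_ne _ _ _ hxh]

lemma pv_foldInsert_getD_not_mem (l : List (Int × String)) (d : PySem.Dict String Int) (k : String)
    (h : k ∉ l.map (fun p => p.2)) :
    (l.foldl (fun d x => d.insert x.2 x.1) d).getD k 0 = d.getD k 0 := by
  induction l generalizing d with
  | nil => rfl
  | cons a t ih =>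
    simp only [List.map_cons, List.mem_cons, not_or] at h
    rw [List.foldl_cons, ih _ h.2, PySem.Dict.getD_insert_of_ne _ _ _ h.1]

lemma pv_foldInsert_getD (l : List (Int × String)) (d : PySem.Dict String Int)
    (h : (l.map (fun p => p.2)).Nodup) (p : Int × String) (hp : p ∈ l) :
    (l.foldl (fun d x => d.insert x.2 x.1) d).getD p.2 0 = p.1 := by
  induction l generalizing d with
  | nil => cases hp
  | cons a t ih =>
    simp only [List.map_cons, List.nodup_cons] at h
    rcases List.mem_cons.mp hp with rfl | hp'
    · rw [List.foldl_cons, pv_foldInsert_getD_not_mem _ _ _ h.1, PySem.Dict.getD_insert_self]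
    · exact ih _ h.2 hp'

lemma pv_indexTable_getD (orders : List (List String)) (i : Nat) (hi : i < (pvFoods orders).length) :
    (pvIdxTbl orders).getD ((pvFoods orders)[i]) 0 = (i : Int) := by
  have hnd : (pvFoods orders).Nodup :=
    (PySem.List.sorted_perm _ _ _).nodup_iff.mpr (PySem.Set.nodup_ofList _)
  have := pv_foldInsert_getD (PySem.List.enumerate (pvFoods orders) 0) PySem.Dict.empty
    (by rw [PySem.List.map_snd_enumerate]; exact hnd)
    ((i : Int), (pvFoods orders)[i])
    (by rw [PySem.List.mem_enumerate_iff]; exact ⟨i, hi, by simp⟩)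
  simpa [pvIdxTbl] using this

lemma pv_update_self (s : PySem.Set String) (l : List String) (h : ∀ x ∈ l, x ∈ s) :
    PySem.Set.update s l = s := by
  induction l generalizing s with
  | nil => rfl
  | cons a t ih =>
    have ha : PySem.Set.add s a = s := by
      simp [PySem.Set.add, PySem.Set.contains, h a (by simp)]
    show PySem.Set.update (PySem.Set.add s a) t = s
    rw [ha]; exact ih s (fun x hx => h x (by simp [hx]))

lemma pv_modifyFold_getD (g : List String → List Int → List Int)
    (l : List (List String)) (d : PySem.Dict String (List Int)) (t : String) :
    ((l.foldl (fun d r => d.modify (pvK1 r) [] (g r)) d).getD t [])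
      = (l.filter (fun r => pvK1 r == t)).foldl (fun v r => g r v) (d.getD t []) := by
  induction l generalizing d with
  | nil => rfl
  | cons r rest ih =>
    rw [List.foldl_cons, ih, List.filter_cons]
    by_cases h : pvK1 r = t
    · simp [h]
    · have : (pvK1 r == t) = false := by simp [h]
      simp [this, PySem.Dict.getD_modify, Ne.symm h]

lemma pv_vecFold_length (ix : List String → Int) (l : List (List String)) (v : List Int) :
    (l.foldl (fun v r => PySem.List.pySetD v (ix r) (PySem.List.pyGetD v (ix r) 0 + 1)) v).length
      = v.length := by
  induction l generalizing v with
  | nil => rfl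
  | cons r rest ih => rw [List.foldl_cons, ih, PySem.List.length_pySetD]

lemma pv_vecFold_getD (ix : List String → Int) (l : List (List String)) (v : List Int)
    (hix : ∀ r ∈ l, ∃ n : Nat, ix r = (n : Int) ∧ n < v.length) (i : Nat) :
    PySem.List.pyGetD
        (l.foldl (fun v r => PySem.List.pySetD v (ix r) (PySem.List.pyGetD v (ix r) 0 + 1)) v)
        (i : Int) 0
      = PySem.List.pyGetD v (i : Int) 0
        + ((l.filter (fun r => ix r == (i : Int))).length : Int) := by
  induction l generalizing v with
  | nil => simp
  | cons r rest ih =>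
    obtain ⟨n, hn, hlt⟩ := hix r (by simp)
    have hlen : (PySem.List.pySetD v (ix r) (PySem.List.pyGetD v (ix r) 0 + 1)).length = v.length :=
      PySem.List.length_pySetD _ _ _
    rw [List.foldl_cons, ih _ (fun r' hr' => by
      obtain ⟨m, hm, hmlt⟩ := hix r' (by simp [hr'])
      exact ⟨m, hm, by rw [hlen]; exact hmlt⟩), List.filter_cons]
    rw [hn, PySem.List.pyGetD_pySetD_natCast v n i _ 0 hlt]
    by_cases hni : i = n
    · subst hni
      simp only [beq_self_eq_true]
      simp [List.length_cons]; ring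
    · have : ((n : Int) == (i : Int)) = false := by
        simp; omega
      simp [this, hni]

-- items of a dict with distinct keys, as a map over its keys
lemma pv_items_eq {ν : Type} (d : PySem.Dict String ν) (d0 : ν) (h : d.keys.Nodup) :
    d.items = d.keys.map (fun k => (k, d.getD k d0)) := by
  obtain ⟨l⟩ := d
  induction l with
  | nil => rfl
  | cons p rest ih =>
    obtain ⟨k, v⟩ := p
    simp only [PySem.Dict.keys_mk, List.map_cons, List.nodup_cons] at h
    have h1 : (PySem.Dict.mk ((k, v) :: rest)).getD k d0 = v := by
      simp [PySem.Dict.getD, PySem.Dict.get?_mk_cons]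
    have h2 : ∀ k' ∈ rest.map (fun x : String × ν => x.1),
        (PySem.Dict.mk ((k, v) :: rest)).getD k' d0 = (PySem.Dict.mk rest).getD k' d0 := by
      intro k' hk'
      have hne : (k == k') = false := by
        have : k ≠ k' := fun he => h.1 (he ▸ hk')
        simp [this]
      simp [PySem.Dict.getD, PySem.Dict.get?_mk_cons, hne]
    show (k, v) :: rest = _
    simp only [PySem.Dict.keys_mk, List.map_cons]
    rw [h1]
    have h3 : rest = List.map (fun k' => (k', (PySem.Dict.mk rest).getD k' d0))
        (rest.map (fun x : String × ν => x.1)) := by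
      simpa [PySem.Dict.keys_mk] using ih (by simpa [PySem.Dict.keys_mk] using h.2)
    rw [show (List.map (fun k' => (k', (PySem.Dict.mk ((k, v) :: rest)).getD k' d0))
          (rest.map (fun x : String × ν => x.1)))
        = List.map (fun k' => (k', (PySem.Dict.mk rest).getD k' d0))
          (rest.map (fun x : String × ν => x.1)) from
      List.map_congr_left (fun k' hk' => by rw [h2 k' hk'])]
    rw [← h3]

lemma pvK1_fold (r : List String) : PySem.List.pyGetD r 1 "" = pvK1 r := rfl
lemma pvK2_fold (r : List String) : PySem.List.pyGetD r 2 "" = pvK2 r := rfl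
lemma pvFoods_fold (orders : List (List String)) :
    PySem.List.sorted (PySem.Set.ofList (orders.map pvK2)) (fun x => x) false = pvFoods orders := rfl
lemma pvTables_fold (orders : List (List String)) :
    PySem.List.sorted (PySem.Set.ofList (orders.map pvK1))
      (fun x => (PySem.Int.ofStr? x).getD 0) false = pvTables orders := rfl
lemma pvIdxTbl_fold (orders : List (List String)) :
    (PySem.List.enumerate (pvFoods orders) 0).foldl (fun d x => d.insert x.2 x.1)
      PySem.Dict.empty = pvIdxTbl orders := rfl
lemma pvIx_fold (orders : List (List String)) (r : List String) :
    (pvIdxTbl orders).getD (pvK2 r) 0 = pvIx orders r := rfl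
lemma pv_update_empty {α : Type} [BEq α] (l : List α) :
    PySem.Set.update PySem.Set.empty l = PySem.Set.ofList l := PySem.Set.update_nil_left l

lemma pv_foods_nodup (orders : List (List String)) : (pvFoods orders).Nodup :=
  (PySem.List.sorted_perm _ _ _).nodup_iff.mpr (PySem.Set.nodup_ofList _)
lemma pv_tables_nodup (orders : List (List String)) : (pvTables orders).Nodup :=
  (PySem.List.sorted_perm _ _ _).nodup_iff.mpr (PySem.Set.nodup_ofList _)
lemma pv_mem_tables (orders : List (List String)) (x : String) (hx : x ∈ orders.map pvK1) :
    x ∈ pvTables orders :=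
  (PySem.List.mem_sorted _ _ _ _).mpr ((PySem.Set.mem_ofList _ _).mpr hx)

lemma pv_ix_spec (orders : List (List String)) (r : List String) (hr : r ∈ orders) :
    ∃ (n : Nat) (h : n < (pvFoods orders).length),
      pvIx orders r = (n : Int) ∧ (pvFoods orders)[n] = pvK2 r := by
  have hmem : pvK2 r ∈ pvFoods orders :=
    (PySem.List.mem_sorted _ _ _ _).mpr
      ((PySem.Set.mem_ofList _ _).mpr (List.mem_map_of_mem hr))
  obtain ⟨j, hj, hje⟩ := List.mem_iff_getElem.mp hmem
  refine ⟨j, hj, ?_, hje⟩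
  show (pvIdxTbl orders).getD (pvK2 r) 0 = (j : Int)
  rw [← hje]
  exact pv_indexTable_getD orders j hj

lemma pv_items_eq' {ν : Type} (d : PySem.Dict String ν) (d0 : ν) (ks : List String)
    (h : d.keys = ks) (hk : ks.Nodup) :
    d.items = ks.map (fun k => (k, d.getD k d0)) := by
  subst h; exact pv_items_eq d d0 hk

theorem displayTable_main : ∀ (orders : List (List String)),
    displayTable orders = displayTable_alt orders := by
  intro orders
  have hfood_nd := pv_foods_nodup orders
  have htbl_nd := pv_tables_nodup orders
  unfold displayTable displayTable_alt
  simp only [pv_setsFold, pv_update_empty,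
    pvFoods_fold, pvTables_fold, pvIdxTbl_fold, pvK1_fold, pvK2_fold, pvIx_fold,
    List.singleton_append]
  have hkeys0 : ((pvTables orders).foldl
      (fun d t => d.insert t (List.replicate (pvFoods orders).length 0))
      (PySem.Dict.empty : PySem.Dict String (List Int))).keys = pvTables orders := by
    calc ((pvTables orders).foldl
        (fun d t => d.insert t (List.replicate (pvFoods orders).length 0))
        (PySem.Dict.empty : PySem.Dict String (List Int))).keys
        = PySem.Set.update (PySem.Dict.empty : PySem.Dict String (List Int)).keys
            (pvTables orders) :=
          PySem.Dict.keys_foldl_insert _ (fun _ _ => List.replicate (pvFoods orders).length 0) _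
      _ = pvTables orders := by
          rw [show (PySem.Dict.empty : PySem.Dict String (List Int)).keys = [] from rfl,
            PySem.Set.update_nil_left, PySem.Set.ofList_eq_self_of_nodup _ htbl_nd]
  have hkeysF : (orders.foldl
      (fun (d : PySem.Dict String (List Int)) order => d.modify (pvK1 order) []
        (fun v => PySem.List.pySetD v (pvIx orders order)
          (PySem.List.pyGetD v (pvIx orders order) 0 + 1)))
      ((pvTables orders).foldl
        (fun d t => d.insert t (List.replicate (pvFoods orders).length 0))
        PySem.Dict.empty)).keys = pvTables orders := by
    calc (orders.foldl
        (fun (d : PySem.Dict String (List Int)) order => d.modify (pvK1 order) []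
          (fun v => PySem.List.pySetD v (pvIx orders order)
            (PySem.List.pyGetD v (pvIx orders order) 0 + 1)))
        ((pvTables orders).foldl
          (fun d t => d.insert t (List.replicate (pvFoods orders).length 0))
          PySem.Dict.empty)).keys
        = PySem.Set.update ((pvTables orders).foldl
            (fun d t => d.insert t (List.replicate (pvFoods orders).length 0))
            (PySem.Dict.empty : PySem.Dict String (List Int))).keys (orders.map pvK1) :=
          PySem.Dict.keys_foldl_modify_key orders pvK1 []
            (fun _ order v => PySem.List.pySetD v (pvIx orders order)
              (PySem.List.pyGetD v (pvIx orders order) 0 + 1)) _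
      _ = pvTables orders := by
          rw [hkeys0]
          exact pv_update_self _ _ (pv_mem_tables orders)
  rw [pv_items_eq' _ [] _ hkeysF htbl_nd, List.map_map]
  congr 1
  apply List.map_congr_left
  intro t ht
  simp only [Function.comp]
  rw [pv_modifyFold_getD (fun order v => PySem.List.pySetD v (pvIx orders order)
        (PySem.List.pyGetD v (pvIx orders order) 0 + 1)),
    pv_constFold_getD, if_pos ht]
  congr 1
  -- row bodies: each vector entry of A equals B's direct recount
  have hlen : ((orders.filter (fun r => pvK1 r == t)).foldl
      (fun v r => PySem.List.pySetD v (pvIx orders r) (PySem.List.pyGetD v (pvIx orders r) 0 + 1))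
      (List.replicate (pvFoods orders).length (0 : Int))).length = (pvFoods orders).length := by
    have h := pv_vecFold_length (pvIx orders) (orders.filter (fun r => pvK1 r == t))
      (List.replicate (pvFoods orders).length (0 : Int))
    simpa using h
  refine List.ext_getElem (by simp [hlen]) ?_
  intro i h1 h2
  have hiL : i < (pvFoods orders).length := by simpa [hlen] using h1
  simp only [List.getElem_map]
  have hix : ∀ r ∈ orders.filter (fun r => pvK1 r == t), ∃ n : Nat,
      pvIx orders r = (n : Int) ∧ n < (List.replicate (pvFoods orders).length (0:Int)).length := by
    intro r hr
    obtain ⟨n, hn, hixr, _⟩ := pv_ix_spec orders r (List.mem_of_mem_filter hr)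
    exact ⟨n, hixr, by simpa using hn⟩
  have hL : PySem.List.pyGetD ((orders.filter (fun r => pvK1 r == t)).foldl
      (fun v r => PySem.List.pySetD v (pvIx orders r) (PySem.List.pyGetD v (pvIx orders r) 0 + 1))
      (List.replicate (pvFoods orders).length (0 : Int))) (i : Int) 0
      = ((orders.filter (fun r => pvK1 r == t)).foldl
      (fun v r => PySem.List.pySetD v (pvIx orders r) (PySem.List.pyGetD v (pvIx orders r) 0 + 1))
      (List.replicate (pvFoods orders).length (0 : Int)))[i] := by
    rw [PySem.List.pyGetD_natCast]
    exact List.getD_eq_getElem _ _ (by simpa [hlen] using h1)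
  have h3 := pv_vecFold_getD (pvIx orders) (orders.filter (fun r => pvK1 r == t))
    (List.replicate (pvFoods orders).length (0 : Int)) hix i
  rw [← hL, h3]
  have hrep : PySem.List.pyGetD (List.replicate (pvFoods orders).length (0:Int)) (i : Int) 0 = 0 := by
    rw [PySem.List.pyGetD_natCast]
    rw [List.getD_eq_getElem _ _ (by simpa using hiL)]
    simp
  rw [hrep, List.filter_filter, ← List.countP_eq_length_filter]
  have hpt : ∀ r ∈ orders,
      ((pvIx orders r == (i : Int)) && (pvK1 r == t)) = true ↔
      ((pvK1 r == t) && (pvK2 r == (pvFoods orders)[i])) = true := by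
    intro r hr
    obtain ⟨n, hn, hixr, hfe⟩ := pv_ix_spec orders r hr
    simp only [Bool.and_eq_true, beq_iff_eq]
    constructor
    · rintro ⟨ha, hb⟩
      have hni : n = i := by
        rw [hixr] at ha; exact_mod_cast ha
      subst hni
      exact ⟨hb, hfe.symm⟩
    · rintro ⟨ha, hb⟩
      have hni : n = i := (hfood_nd.getElem_inj_iff).mp (hfe.trans hb)
      subst hni
      exact ⟨hixr, ha⟩
  rw [List.countP_congr hpt]
  exact (congrArg PySem.Int.toStr (pv_cellFold t ((pvFoods orders)[i]'hiL) orders 0)).symm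

-- ===== VERDICT (by name: the statement is the Claim_ definition above) =====
theorem displayTable_spec : Claim_equal_displayTable := by
  intro orders _ _
  exact displayTable_main orders
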